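-- pv_equiv track=rewrite | github.com/ming-log/file_upload_system | app/routers/courses.py | _iter_pages
-- ===== SOURCE A (Python) =====
-- def _iter_pages(page, total_pages, left_edge=2, right_edge=2, left_current=2, right_current=2):
--     """辅助函数，用于生成分页序列"""
--     last = 0
--     for num in range(1, total_pages + 1):
--         if num <= left_edge or \
--            (num > page - left_current - 1 and num < page + right_current) or \
--            num > total_pages - right_edge:
--             if last + 1 != num:
--                 yield None
--             yield num
--             last = num
-- ===== SOURCE B (Python) =====
-- def _iter_pages(page, total_pages, left_edge=2, right_edge=2, left_current=2, right_current=2):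
--     # Emit only the three relevant clipped windows (sorted by start), merging on the fly.
--     windows = sorted([
--         (1, min(left_edge, total_pages)),
--         (max(page - left_current, 1), min(page + right_current - 1, total_pages)),
--         (max(total_pages - right_edge + 1, 1), total_pages),
--     ], key=lambda w: w[0])
--     prev_end = 0
--     for lo, hi in windows:
--         start = max(lo, prev_end + 1)
--         if start <= hi:
--             if start != prev_end + 1:
--                 yield None
--             for n in range(start, hi + 1):
--                 yield n
--             prev_end = hi
-- ===== Notes on version B (the rewrite author's own statement) =====
-- stated objective: alternative
-- what changed: Instead of scanning every page number 1..total_pages and testing the three-part condition on each, B builds the three clipped windows (left edge, around current page, right edge), sorts them by start and emits them in one pass, merging overlaps via prev_end and inserting the gap None markers directly.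
import Mathlib
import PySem

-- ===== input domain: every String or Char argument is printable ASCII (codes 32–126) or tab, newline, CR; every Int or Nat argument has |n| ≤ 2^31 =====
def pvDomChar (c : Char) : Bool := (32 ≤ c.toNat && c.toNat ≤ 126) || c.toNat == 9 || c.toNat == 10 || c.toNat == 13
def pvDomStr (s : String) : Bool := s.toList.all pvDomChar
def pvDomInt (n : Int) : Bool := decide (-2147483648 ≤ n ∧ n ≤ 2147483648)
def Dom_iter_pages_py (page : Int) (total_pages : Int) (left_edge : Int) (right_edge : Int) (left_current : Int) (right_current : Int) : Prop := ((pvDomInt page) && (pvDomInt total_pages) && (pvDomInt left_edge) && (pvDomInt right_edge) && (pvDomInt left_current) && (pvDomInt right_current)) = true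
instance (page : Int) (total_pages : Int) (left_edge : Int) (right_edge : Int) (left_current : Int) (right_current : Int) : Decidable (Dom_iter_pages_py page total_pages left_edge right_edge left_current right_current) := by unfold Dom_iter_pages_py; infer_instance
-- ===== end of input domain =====

-- B emits the three relevant clipped windows (left edge, around current page, right edge)
-- directly — sorted by start and merged on the fly via prev_end — instead of A's scan that
-- tests every page number in 1..total_pages. Same yielded sequence (compared as a list).

-- ===== PORT A =====
-- Generator: the yielded sequence is collected into a list; state (last, acc).
def iter_pages_py (page : Int) (total_pages : Int) (left_edge : Int) (right_edge : Int) (left_current : Int) (right_current : Int) : List (Option Int) :=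
  ((PySem.List.pyRange 1 (total_pages + 1) 1).foldl
    (fun (st : Int × List (Option Int)) num =>
      if num ≤ left_edge ∨ (num > page - left_current - 1 ∧ num < page + right_current) ∨ num > total_pages - right_edge then
        (num, st.2 ++ (if st.1 + 1 ≠ num then [none] else []) ++ [some num])
      else st)
    (0, [])).2

-- ===== PORT B =====
-- windows = sorted([...], key=lambda w: w[0]); then one pass with prev_end.
def iter_pages_py_alt (page : Int) (total_pages : Int) (left_edge : Int) (right_edge : Int) (left_current : Int) (right_current : Int) : List (Option Int) :=
  let windows := PySem.List.sorted
    [(1, min left_edge total_pages),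
     (max (page - left_current) 1, min (page + right_current - 1) total_pages),
     (max (total_pages - right_edge + 1) 1, total_pages)]
    (fun w => w.1)
  (windows.foldl
    (fun (st : Int × List (Option Int)) w =>
      let start := max w.1 (st.1 + 1)
      if start ≤ w.2 then
        (w.2, st.2 ++ (if start ≠ st.1 + 1 then [none] else []) ++ (PySem.List.pyRange start (w.2 + 1) 1).map some)
      else st)
    (0, [])).2

-- ===== PRECONDITION & SPEC =====
def Spec_iter_pages_py (page : Int) (total_pages : Int) (left_edge : Int) (right_edge : Int) (left_current : Int) (right_current : Int) (out : List (Option Int)) : Prop := out = iter_pages_py_alt page total_pages left_edge right_edge left_current right_current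
instance (page : Int) (total_pages : Int) (left_edge : Int) (right_edge : Int) (left_current : Int) (right_current : Int) (out : List (Option Int)) : Decidable (Spec_iter_pages_py page total_pages left_edge right_edge left_current right_current out) := by unfold Spec_iter_pages_py; infer_instance

-- ===== CLAIM (what is proved, stated in full; the proofs are below) =====
def Claim_equal_iter_pages_py : Prop := ∀ (page : Int) (total_pages : Int) (left_edge : Int) (right_edge : Int) (left_current : Int) (right_current : Int), Dom_iter_pages_py page total_pages left_edge right_edge left_current right_current → Spec_iter_pages_py page total_pages left_edge right_edge left_current right_current (iter_pages_py page total_pages left_edge right_edge left_current right_current)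

-- ===== LEMMAS AND PROOFS =====

-- Common normal form: render a strictly increasing list of selected page numbers,
-- inserting `none` exactly where the predecessor is not `last + 1`.
def emitGaps (last : Int) : List Int → List (Option Int)
  | [] => []
  | n :: ns => (if last + 1 ≠ n then [none] else []) ++ some n :: emitGaps n ns

-- The numbers B emits, interval by interval.
def emitNums (prev : Int) : List (Int × Int) → List Int
  | [] => []
  | (lo, hi) :: ws =>
      if max lo (prev + 1) ≤ hi then PySem.List.pyRange (max lo (prev + 1)) (hi + 1) 1 ++ emitNums hi ws
      else emitNums prev ws

-- A's loop, fused filter + gap rendering, equals emitGaps of the filtered range.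
theorem foldA_eq (page total_pages left_edge right_edge left_current right_current : Int) :
    ∀ (L : List Int) (last : Int) (acc : List (Option Int)),
      (L.foldl
        (fun (st : Int × List (Option Int)) num =>
          if num ≤ left_edge ∨ (num > page - left_current - 1 ∧ num < page + right_current) ∨ num > total_pages - right_edge then
            (num, st.2 ++ (if st.1 + 1 ≠ num then [none] else []) ++ [some num])
          else st)
        (last, acc)).2
      = acc ++ emitGaps last (L.filter (fun num => decide (num ≤ left_edge ∨ (num > page - left_current - 1 ∧ num < page + right_current) ∨ num > total_pages - right_edge))) := by
  intro L
  induction L with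
  | nil => intro last acc; simp [emitGaps]
  | cons n L ih =>
      intro last acc
      by_cases h : n ≤ left_edge ∨ (n > page - left_current - 1 ∧ n < page + right_current) ∨ n > total_pages - right_edge
      · rw [List.filter_cons_of_pos (by simpa using h)]
        simp only [List.foldl_cons, if_pos h, ih, emitGaps]
        simp only [List.append_assoc, List.singleton_append]
      · rw [List.filter_cons_of_neg (by simpa using h)]
        simp only [List.foldl_cons, if_neg h, ih]

-- B's loop equals emitGaps of emitNums.
theorem foldB_eq :
    ∀ (ws : List (Int × Int)) (prev : Int) (acc : List (Option Int)),
      (ws.foldl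
        (fun (st : Int × List (Option Int)) w =>
          let start := max w.1 (st.1 + 1)
          if start ≤ w.2 then
            (w.2, st.2 ++ (if start ≠ st.1 + 1 then [none] else []) ++ (PySem.List.pyRange start (w.2 + 1) 1).map some)
          else st)
        (prev, acc)).2
      = acc ++ emitGaps prev (emitNums prev ws) := by
  have run : ∀ (k : Nat) (s hi : Int) (tail : List Int) (prev : Int), (hi + 1 - s).toNat = k → s ≤ hi →
      emitGaps prev (PySem.List.pyRange s (hi + 1) 1 ++ tail)
        = (if prev + 1 ≠ s then [none] else []) ++ (PySem.List.pyRange s (hi + 1) 1).map some ++ emitGaps hi tail := by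
    intro k
    induction k with
    | zero => intro s hi tail prev hk hs; omega
    | succ k ih =>
        intro s hi tail prev hk hs
        rw [PySem.List.pyRange_one_cons (by omega)]
        by_cases hlast : s = hi
        · subst hlast
          rw [PySem.List.pyRange_one_eq_nil (by omega)]
          simp [emitGaps]
        · have h1 : s + 1 ≤ hi := by omega
          simp only [List.cons_append, emitGaps, List.map_cons]
          rw [ih (s + 1) hi tail s (by omega) h1]
          simp
  intro ws
  induction ws with
  | nil => intro prev acc; simp [emitNums, emitGaps]
  | cons w ws ih =>
      intro prev acc
      obtain ⟨lo, hi⟩ := w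
      by_cases h : max lo (prev + 1) ≤ hi
      · simp only [List.foldl_cons, emitNums, if_pos h, ih]
        rw [run ((hi + 1 - max lo (prev + 1)).toNat) _ hi _ prev rfl h]
        by_cases hg : max lo (prev + 1) = prev + 1
        · simp [hg]
        · simp [hg]
          rw [if_pos (by omega : prev + 1 < lo)]
          rfl
      · simp only [List.foldl_cons, emitNums, if_neg h, ih]

-- every number B emits is greater than prev
theorem emitNums_gt : ∀ (ws : List (Int × Int)) (prev n : Int), n ∈ emitNums prev ws → prev < n := by
  intro ws
  induction ws with
  | nil => intro prev n h; simp [emitNums] at h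
  | cons w ws ih =>
      intro prev n h
      obtain ⟨lo, hi⟩ := w
      simp only [emitNums] at h
      split at h
      · rcases List.mem_append.mp h with h | h
        · have := PySem.List.mem_pyRange_one.mp h; omega
        · have := ih hi n h; omega
      · exact ih prev n h

-- B's emitted numbers are strictly increasing
theorem emitNums_pairwise : ∀ (ws : List (Int × Int)) (prev : Int), (emitNums prev ws).Pairwise (· < ·) := by
  intro ws
  induction ws with
  | nil => intro prev; simp [emitNums]
  | cons w ws ih =>
      intro prev
      obtain ⟨lo, hi⟩ := w
      simp only [emitNums]
      split
      · refine List.pairwise_append.mpr ⟨PySem.List.pairwise_lt_pyRange_one _ _, ih hi, ?_⟩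
        intro a ha b hb
        have h1 := PySem.List.mem_pyRange_one.mp ha
        have h2 := emitNums_gt ws hi b hb
        omega
      · exact ih prev

-- membership in B's emitted numbers (for a start-sorted window list)
theorem emitNums_mem : ∀ (ws : List (Int × Int)) (prev n : Int),
    ws.Pairwise (fun a b => a.1 ≤ b.1) →
    (n ∈ emitNums prev ws ↔ prev < n ∧ ∃ w ∈ ws, w.1 ≤ n ∧ n ≤ w.2) := by
  intro ws
  induction ws with
  | nil => intro prev n _; simp [emitNums]
  | cons w ws ih =>
      intro prev n hsort
      obtain ⟨lo, hi⟩ := w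
      have hlo : ∀ w' ∈ ws, lo ≤ w'.1 := by
        intro w' hw'; exact (List.pairwise_cons.mp hsort).1 w' hw'
      have htail := (List.pairwise_cons.mp hsort).2
      simp only [emitNums]
      split
      · rename_i hle
        rw [List.mem_append, PySem.List.mem_pyRange_one, ih hi n htail]
        constructor
        · rintro (⟨h1, h2⟩ | ⟨h1, w', hw', h2, h3⟩)
          · exact ⟨by omega, ⟨(lo, hi), by simp, by omega, by omega⟩⟩
          · exact ⟨by omega, ⟨w', by simp [hw'], h2, h3⟩⟩
        · rintro ⟨hp, w', hw', h2, h3⟩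
          rcases List.mem_cons.mp hw' with rfl | hw'
          · left; simp at h2 h3 ⊢; omega
          · by_cases hn : n ≤ hi
            · have := hlo w' hw'; left; omega
            · right; exact ⟨by omega, w', hw', h2, h3⟩
      · rename_i hgt
        rw [ih prev n htail]
        constructor
        · rintro ⟨hp, w', hw', h2, h3⟩; exact ⟨hp, w', by simp [hw'], h2, h3⟩
        · rintro ⟨hp, w', hw', h2, h3⟩
          rcases List.mem_cons.mp hw' with rfl | hw'
          · simp at h2 h3; omega
          · exact ⟨hp, w', hw', h2, h3⟩

-- two strictly increasing integer lists with the same members are equal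
theorem eq_of_pairwise_lt_of_mem_iff (xs ys : List Int)
    (hx : xs.Pairwise (· < ·)) (hy : ys.Pairwise (· < ·)) (h : ∀ n, n ∈ xs ↔ n ∈ ys) : xs = ys :=
  List.Perm.eq_of_pairwise (fun a b _ _ h1 h2 => absurd h2 (by omega)) hx hy
    ((List.perm_ext_iff_of_nodup hx.nodup hy.nodup).mpr h)

-- the crux: B's emitted numbers are exactly A's filtered range
theorem emitNums_eq_filter (page total_pages left_edge right_edge left_current right_current : Int) :
    emitNums 0 (PySem.List.sorted
      [(1, min left_edge total_pages),
       (max (page - left_current) 1, min (page + right_current - 1) total_pages),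
       (max (total_pages - right_edge + 1) 1, total_pages)]
      (fun w => w.1))
    = (PySem.List.pyRange 1 (total_pages + 1) 1).filter
        (fun num => decide (num ≤ left_edge ∨ (num > page - left_current - 1 ∧ num < page + right_current) ∨ num > total_pages - right_edge)) := by
  apply eq_of_pairwise_lt_of_mem_iff
  · exact emitNums_pairwise _ 0
  · exact (PySem.List.pairwise_lt_pyRange_one 1 (total_pages + 1)).filter _
  · intro n
    rw [emitNums_mem _ 0 n (PySem.List.sorted_pairwise _ _)]
    rw [List.mem_filter, PySem.List.mem_pyRange_one]
    constructor
    · rintro ⟨hp, w, hw, h1, h2⟩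
      rw [PySem.List.mem_sorted] at hw
      simp only [List.mem_cons, List.not_mem_nil, or_false] at hw
      rcases hw with rfl | rfl | rfl <;> simp only [decide_eq_true_eq] <;> constructor <;> simp at h1 h2 ⊢ <;> omega
    · rintro ⟨⟨h1, h2⟩, hc⟩
      simp only [decide_eq_true_eq] at hc
      refine ⟨by omega, ?_⟩
      have hmem : ∀ w ∈ [((1 : Int), min left_edge total_pages),
          (max (page - left_current) 1, min (page + right_current - 1) total_pages),
          (max (total_pages - right_edge + 1) 1, total_pages)], w ∈ PySem.List.sorted
          [((1 : Int), min left_edge total_pages),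
           (max (page - left_current) 1, min (page + right_current - 1) total_pages),
           (max (total_pages - right_edge + 1) 1, total_pages)] (fun w => w.1) := by
        intro w hw; rw [PySem.List.mem_sorted]; exact hw
      rcases hc with hc | hc | hc
      · exact ⟨(1, min left_edge total_pages), hmem _ (by simp),
          by show (1 : Int) ≤ n; omega, by show n ≤ min left_edge total_pages; omega⟩
      · exact ⟨(max (page - left_current) 1, min (page + right_current - 1) total_pages), hmem _ (by simp),
          by show max (page - left_current) 1 ≤ n; omega, by show n ≤ min (page + right_current - 1) total_pages; omega⟩
      · exact ⟨(max (total_pages - right_edge + 1) 1, total_pages), hmem _ (by simp),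
          by show max (total_pages - right_edge + 1) 1 ≤ n; omega, by show n ≤ total_pages; omega⟩

-- ===== VERDICT (by name: the statement is the Claim_ definition above) =====
theorem iter_pages_py_spec : Claim_equal_iter_pages_py := by
  intro page total_pages left_edge right_edge left_current right_current _
  unfold Spec_iter_pages_py iter_pages_py iter_pages_py_alt
  rw [foldA_eq, foldB_eq, emitNums_eq_filter]
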